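-- pv_equiv track=rewrite | github.com/arussellk/covert-ping-exfiltration | telnet-pinger/extra_funcs.py | convert_bytes_nibs
-- ===== SOURCE A (Python) =====
-- def convert_bytes_nibs(bytes):
--     bit_patterns=[]
--     for byte in bytes:
--         my_bin=bin(byte)
--         num_arr=list(my_bin[2:])
--         pad0=8-len(num_arr)
--         if(pad0!=0):
--             for i in range(pad0):
--                 num_arr.insert(0, "0")
--         bit_patterns.append(num_arr)
--     for i in range(len(bytes)):
--         byte=bit_patterns.pop(0)
--         to_append=""
--         for i in range(4):
--             to_append+=byte.pop(0)
--         bit_patterns.append(to_append)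
--         to_append=""
--         for i in range(4):
--             to_append+=byte.pop(0)
--         bit_patterns.append(to_append)
--     return bit_patterns
-- ===== SOURCE B (Python) =====
-- def convert_bytes_nibs(bytes):
--     out = []
--     for byte in bytes:
--         s = bin(byte)[2:].rjust(8, '0')
--         out.append(s[:4])
--         out.append(s[4:8])
--     return out
-- ===== Notes on version B (the rewrite author's own statement) =====
-- stated objective: faster
-- what changed: B replaces A's two passes (build a list of padded 8-char arrays, then drain it as a FIFO queue with pop(0) char by char) with a single loop that pads via rjust and appends the two nibble slices s[:4], s[4:8] directly.
import Mathlib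
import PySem

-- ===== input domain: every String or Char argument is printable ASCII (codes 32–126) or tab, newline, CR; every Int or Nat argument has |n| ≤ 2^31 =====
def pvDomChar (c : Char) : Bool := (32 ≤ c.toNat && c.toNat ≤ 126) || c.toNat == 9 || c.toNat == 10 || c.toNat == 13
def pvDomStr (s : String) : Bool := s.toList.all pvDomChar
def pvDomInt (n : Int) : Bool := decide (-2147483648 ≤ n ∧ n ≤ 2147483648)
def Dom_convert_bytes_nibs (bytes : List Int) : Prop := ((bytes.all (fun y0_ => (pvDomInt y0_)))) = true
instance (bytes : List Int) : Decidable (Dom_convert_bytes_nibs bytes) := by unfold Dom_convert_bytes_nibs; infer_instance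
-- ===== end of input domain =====

-- B replaces A's two passes (padded char-array list, then FIFO pop(0) drain) with one
-- loop that pads via rjust and appends the two nibble slices directly, removing the quadratic queue shuffling (objective: faster).


-- ===== PORT A =====
-- bin(byte)[2:] as a char list: binary digits of |byte|, preceded by 'b' for a negative
-- byte (Python: bin(-5) = '-0b101', so [2:] = 'b101'). Exact model of bin(x)[2:].
def pyBinTail (n : Int) : List Char :=
  if n < 0 then 'b' :: Nat.toDigits 2 n.natAbs else Nat.toDigits 2 n.toNat

-- the pad loop: 'for i in range(pad0): num_arr.insert(0, "0")'
def pvPadLoop (r : List Int) (num_arr : List Char) : List Char :=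
  r.foldl (fun arr _ => '0' :: arr) num_arr

-- 'to_append=""; for i in range(4): to_append += byte.pop(0)'
-- (the empty branch is unreachable in A's runs: every queued array has ≥ 8 chars)
def pvPop4 (arr : List Char) : String × List Char :=
  (List.range 4).foldl
    (fun (p : String × List Char) _ =>
      match p.2 with
      | c :: rest => (p.1.push c, rest)
      | [] => (p.1, []))
    ("", arr)

-- first pass of A: build bit_patterns, a list of padded char arrays
def pvPhase1 (bytes : List Int) : List (List Char) :=
  bytes.foldl
    (fun bit_patterns byte =>
      let num_arr := pyBinTail byte
      let pad0 : Int := 8 - num_arr.length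
      let num_arr := if pad0 ≠ 0 then pvPadLoop (PySem.List.pyRange 0 pad0 1) num_arr else num_arr
      bit_patterns ++ [num_arr]) []

-- second pass of A: the loop runs len(bytes) times, each iteration pops the front array
-- (all pops hit the original arrays, appended strings go to the back), so the queue is
-- exactly (remaining arrays, appended strings); this recursion is that loop verbatim.
def pvPhase2 : List (List Char) → List String → List String
  | [], acc => acc
  | arr :: rest, acc =>
    let (s1, arr1) := pvPop4 arr
    let (s2, _) := pvPop4 arr1
    pvPhase2 rest (acc ++ [s1, s2])

def convert_bytes_nibs (bytes : List Int) : List String :=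
  pvPhase2 (pvPhase1 bytes) []

-- ===== PORT B =====
-- per byte: s = bin(byte)[2:].rjust(8,'0'); append s[:4] and s[4:8]
def convert_bytes_nibs_alt (bytes : List Int) : List String :=
  bytes.foldl
    (fun out byte =>
      let s := List.replicate (8 - (pyBinTail byte).length) '0' ++ pyBinTail byte  -- rjust(8,'0')
      out ++ [String.ofList (s.take 4), String.ofList ((s.drop 4).take 4)])               -- s[:4], s[4:8]
    []

-- ===== PRECONDITION & SPEC =====
def Spec_convert_bytes_nibs (bytes : List Int) (out : List String) : Prop := out = convert_bytes_nibs_alt bytes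
instance (bytes : List Int) (out : List String) : Decidable (Spec_convert_bytes_nibs bytes out) := by unfold Spec_convert_bytes_nibs; infer_instance

-- ===== CLAIM (what is proved, stated in full; the proofs are below) =====
def Claim_equal_convert_bytes_nibs : Prop := ∀ (bytes : List Int), Dom_convert_bytes_nibs bytes → Spec_convert_bytes_nibs bytes (convert_bytes_nibs bytes)

-- ===== LEMMAS AND PROOFS =====

-- the padded array a byte contributes in either port
def pvPadded (byte : Int) : List Char :=
  List.replicate (8 - (pyBinTail byte).length) '0' ++ pyBinTail byte

theorem pvPadLoop_eq (r : List Int) (l : List Char) :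
    pvPadLoop r l = List.replicate r.length '0' ++ l := by
  induction r generalizing l with
  | nil => rfl
  | cons x xs ih =>
    show pvPadLoop xs ('0' :: l) = _
    rw [ih ('0' :: l)]
    simp [List.replicate_succ']

theorem pvPhase1_arr (byte : Int) :
    (let num_arr := pyBinTail byte
     let pad0 : Int := 8 - num_arr.length
     if pad0 ≠ 0 then pvPadLoop (PySem.List.pyRange 0 pad0 1) num_arr else num_arr)
    = pvPadded byte := by
  simp only [pvPadded]
  by_cases h : (8 - ((pyBinTail byte).length : Int)) = 0
  · have : 8 - (pyBinTail byte).length = 0 := by omega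
    simp [h, this]
  · simp only [h, ne_eq, not_false_iff, if_pos]
    rw [pvPadLoop_eq, PySem.List.length_pyRange_one]
    congr 2
    omega

theorem pvPhase1_eq (bytes : List Int) :
    pvPhase1 bytes = bytes.map pvPadded := by
  have h : ∀ (bs : List Int) (acc : List (List Char)),
      bs.foldl (fun bit_patterns byte =>
        let num_arr := pyBinTail byte
        let pad0 : Int := 8 - num_arr.length
        let num_arr := if pad0 ≠ 0 then pvPadLoop (PySem.List.pyRange 0 pad0 1) num_arr else num_arr
        bit_patterns ++ [num_arr]) acc = acc ++ bs.map pvPadded := by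
    intro bs
    induction bs with
    | nil => intro acc; simp
    | cons b tl ih =>
      intro acc
      simp only [List.foldl, List.map]
      rw [ih, pvPhase1_arr b]
      simp
  rw [pvPhase1, h bytes [], List.nil_append]

theorem pvPop4_eq (l : List Char) (h : 4 ≤ l.length) :
    pvPop4 l = (String.ofList (l.take 4), l.drop 4) := by
  match l, h with
  | a :: b :: c :: d :: rest, _ =>
    simp [pvPop4, List.range, List.range.loop, Prod.ext_iff, String.ext_iff]

theorem pvPadded_length (byte : Int) : 8 ≤ (pvPadded byte).length := by
  simp [pvPadded, List.length_replicate]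
  omega

theorem pvPhase2_eq (l : List (List Char)) (acc : List String) :
    pvPhase2 l acc = acc ++ l.flatMap (fun arr => [(pvPop4 arr).1, (pvPop4 (pvPop4 arr).2).1]) := by
  induction l generalizing acc with
  | nil => simp [pvPhase2]
  | cons arr rest ih =>
    simp only [pvPhase2, List.flatMap_cons]
    rw [ih]
    simp

theorem alt_eq (bytes : List Int) :
    convert_bytes_nibs_alt bytes =
      bytes.flatMap (fun byte =>
        [String.ofList ((pvPadded byte).take 4), String.ofList (((pvPadded byte).drop 4).take 4)]) := by
  have h : ∀ (bs : List Int) (acc : List String),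
      bs.foldl (fun out byte =>
        let s := List.replicate (8 - (pyBinTail byte).length) '0' ++ pyBinTail byte
        out ++ [String.ofList (s.take 4), String.ofList ((s.drop 4).take 4)]) acc
      = acc ++ bs.flatMap (fun byte =>
        [String.ofList ((pvPadded byte).take 4), String.ofList (((pvPadded byte).drop 4).take 4)]) := by
    intro bs
    induction bs with
    | nil => intro acc; simp
    | cons b tl ih =>
      intro acc
      simp only [List.foldl, List.flatMap_cons]
      rw [ih]
      simp [pvPadded]
  rw [convert_bytes_nibs_alt, h bytes [], List.nil_append]

theorem per_byte (byte : Int) :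
    [(pvPop4 (pvPadded byte)).1, (pvPop4 (pvPop4 (pvPadded byte)).2).1]
    = [String.ofList ((pvPadded byte).take 4), String.ofList (((pvPadded byte).drop 4).take 4)] := by
  have h8 := pvPadded_length byte
  rw [pvPop4_eq (pvPadded byte) (by omega)]
  rw [pvPop4_eq ((pvPadded byte).drop 4) (by simp [List.length_drop]; omega)]

-- ===== VERDICT (by name: the statement is the Claim_ definition above) =====
theorem convert_bytes_nibs_spec : Claim_equal_convert_bytes_nibs := by
  intro bytes _
  unfold Spec_convert_bytes_nibs
  rw [convert_bytes_nibs, pvPhase1_eq, pvPhase2_eq, alt_eq]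
  simp only [List.flatMap_map, List.nil_append]
  exact List.flatMap_congr (fun byte _ => per_byte byte)
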